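-- pv_equiv track=rewrite | github.com/LinkesAuge/Bot_worldscan | scout/automation/search_patterns.py | spiral_pattern
-- ===== SOURCE A (Python) =====
-- from typing import Generator, Tuple, List, Optional
--
-- def spiral_pattern(
--     center_x: int,
--     center_y: int,
--     max_radius: int,
--     step_size: int = 1
-- ) -> Generator[Tuple[int, int], None, None]:
--     """
--     Generate coordinates in a spiral pattern starting from a center point.
--
--     This pattern is efficient when targets are likely to be closer to the center.
--     The spiral moves outward in a square pattern, visiting all points within the
--     specified maximum radius.
--
--     Args:
--         center_x: X-coordinate of the center point
--         center_y: Y-coordinate of the center point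
--         max_radius: Maximum distance from center to search (in grid units)
--         step_size: Distance between consecutive points (default: 1)
--
--     Yields:
--         Tuples of (x, y) coordinates to visit
--     """
--     # Start at the center
--     yield (center_x, center_y)
--
--     # Spiral outward
--     for radius in range(step_size, max_radius + 1, step_size):
--         # Top edge (left to right)
--         x = center_x - radius
--         for i in range(0, 2 * radius + 1, step_size):
--             yield (x + i, center_y - radius)
--
--         # Right edge (top to bottom)
--         y = center_y - radius
--         for i in range(step_size, 2 * radius + 1, step_size):
--             yield (center_x + radius, y + i)
--
--         # Bottom edge (right to left)
--         x = center_x + radius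
--         for i in range(step_size, 2 * radius + 1, step_size):
--             yield (x - i, center_y + radius)
--
--         # Left edge (bottom to top)
--         y = center_y + radius
--         for i in range(step_size, 2 * radius, step_size):
--             yield (center_x - radius, y - i)
-- ===== SOURCE B (Python) =====
-- def spiral_pattern(center_x, center_y, max_radius, step_size=1):
--     # Walk each ring's perimeter with one loop over direction deltas,
--     # maintaining a current position, instead of four separate edge loops.
--     if step_size <= 0:
--         raise ValueError("step_size must be a positive integer")
--     yield (center_x, center_y)
--     deltas = [(1, 0), (0, 1), (-1, 0), (0, -1)]
--     radius = step_size
--     while radius <= max_radius: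
--         x, y = center_x - radius, center_y - radius
--         yield (x, y)
--         n = 2 * radius // step_size
--         for d, (dx, dy) in enumerate(deltas):
--             for _ in range(n if d < 3 else n - 1):
--                 x += dx * step_size
--                 y += dy * step_size
--                 yield (x, y)
--         radius += step_size
-- ===== Notes on version B (the rewrite author's own statement) =====
-- stated objective: alternative
-- what changed: Replaces the four separate per-edge loops with a single perimeter walk over direction deltas [(1,0),(0,1),(-1,0),(0,-1)] that maintains a current position, taking n=2*radius//step_size moves per side and n-1 on the last side, with radii advanced by a validated while loop.
-- outside the precondition, e.g. on spiral_pattern(0, 0, -3, -1): A returns [(0, 0), (1, 1), (1, 0)], B raises ValueError; on spiral_pattern(0, 0, 3, 0): A raises ValueError, B raises ValueError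
import Mathlib
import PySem

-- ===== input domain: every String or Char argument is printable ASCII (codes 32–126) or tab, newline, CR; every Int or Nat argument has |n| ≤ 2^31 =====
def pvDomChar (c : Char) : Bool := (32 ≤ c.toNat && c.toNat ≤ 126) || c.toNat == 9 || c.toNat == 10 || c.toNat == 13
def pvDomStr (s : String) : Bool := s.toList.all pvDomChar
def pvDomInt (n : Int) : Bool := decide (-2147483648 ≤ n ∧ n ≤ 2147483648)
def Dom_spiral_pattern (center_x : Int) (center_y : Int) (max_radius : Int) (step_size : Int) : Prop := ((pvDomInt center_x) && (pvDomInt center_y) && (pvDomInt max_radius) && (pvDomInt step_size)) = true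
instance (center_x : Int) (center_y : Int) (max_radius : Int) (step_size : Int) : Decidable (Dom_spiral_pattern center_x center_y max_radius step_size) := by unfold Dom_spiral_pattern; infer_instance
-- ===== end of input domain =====

-- B walks each ring's perimeter with one loop over direction deltas and a current position
-- advanced by a validated while loop, instead of A's four per-edge range loops (alternative
-- decomposition, same cost); return-value equivalence for step_size ≥ 1.


-- ===== PORT A =====
-- literal transliteration: yield the center, then per radius the four edge loops
def spiral_pattern (center_x : Int) (center_y : Int) (max_radius : Int) (step_size : Int) : List (Int × Int) :=
  (center_x, center_y) ::
  (PySem.List.pyRange step_size (max_radius + 1) step_size).foldl (fun acc radius =>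
    acc
    ++ (PySem.List.pyRange 0 (2 * radius + 1) step_size).map
         (fun i => ((center_x - radius) + i, center_y - radius))
    ++ (PySem.List.pyRange step_size (2 * radius + 1) step_size).map
         (fun i => (center_x + radius, (center_y - radius) + i))
    ++ (PySem.List.pyRange step_size (2 * radius + 1) step_size).map
         (fun i => ((center_x + radius) - i, center_y + radius))
    ++ (PySem.List.pyRange step_size (2 * radius) step_size).map
         (fun i => (center_x - radius, (center_y + radius) - i))) []

-- ===== PORT B =====
-- 'for _ in range(moves): x += dx*s; y += dy*s; yield (x, y)' — threads (x, y, yielded so far)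
def pvRun (s dx dy : Int) : Nat → (Int × Int × List (Int × Int)) → (Int × Int × List (Int × Int))
  | 0, st => st
  | m + 1, (x, y, acc) =>
      pvRun s dx dy m (x + dx * s, y + dy * s, acc ++ [(x + dx * s, y + dy * s)])

-- one ring: yield the top-left corner, then walk the four sides via enumerate(deltas)
def pvRing (cx cy radius s : Int) : List (Int × Int) :=
  let x0 := cx - radius
  let y0 := cy - radius
  let n := PySem.Int.floordiv (2 * radius) s
  ((PySem.List.enumerate [((1 : Int), (0 : Int)), (0, 1), (-1, 0), (0, -1)]).foldl
    (fun st d => pvRun s d.2.1 d.2.2 (if d.1 < 3 then n else n - 1).toNat st)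
    (x0, y0, [(x0, y0)])).2.2

-- 'while radius <= max_radius: <ring>; radius += step_size' (the '1 ≤ s' conjunct only
-- totalises the recursion; Source B has validated step_size ≥ 1 before the loop is reached)
def pvRings (cx cy maxr s radius : Int) (acc : List (Int × Int)) : List (Int × Int) :=
  if h : 1 ≤ s ∧ radius ≤ maxr then
    pvRings cx cy maxr s (radius + s) (acc ++ pvRing cx cy radius s)
  else acc
termination_by (maxr + 1 - radius).toNat
decreasing_by obtain ⟨h1, h2⟩ := h; omega

def spiral_pattern_alt (center_x : Int) (center_y : Int) (max_radius : Int) (step_size : Int) : List (Int × Int) :=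
  if step_size ≤ 0 then []  -- Source B raises ValueError here (outside Pre_)
  else (center_x, center_y) :: pvRings center_x center_y max_radius step_size step_size []

-- ===== PRECONDITION & SPEC =====
-- Pre_ excludes step_size ≤ 0: at 0 both programs raise ValueError; for negative step_size
-- (outside the natural domain — it is the 'distance between consecutive points') A returns
-- accidental partial edges produced by range() semantics while B rejects the value.
def Pre_spiral_pattern (center_x : Int) (center_y : Int) (max_radius : Int) (step_size : Int) : Prop :=
  1 ≤ step_size
instance (center_x : Int) (center_y : Int) (max_radius : Int) (step_size : Int) : Decidable (Pre_spiral_pattern center_x center_y max_radius step_size) := by unfold Pre_spiral_pattern; infer_instance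

def pvWitness_spiral_pattern : Int × Int × Int × Int := (0, 0, 3, 1)

def Spec_spiral_pattern (center_x : Int) (center_y : Int) (max_radius : Int) (step_size : Int) (out : List (Int × Int)) : Prop := out = spiral_pattern_alt center_x center_y max_radius step_size
instance (center_x : Int) (center_y : Int) (max_radius : Int) (step_size : Int) (out : List (Int × Int)) : Decidable (Spec_spiral_pattern center_x center_y max_radius step_size out) := by unfold Spec_spiral_pattern; infer_instance

-- ===== CLAIM (what is proved, stated in full; the proofs are below) =====
def Claim_equal_spiral_pattern : Prop := ∀ (center_x : Int) (center_y : Int) (max_radius : Int) (step_size : Int), Dom_spiral_pattern center_x center_y max_radius step_size → Pre_spiral_pattern center_x center_y max_radius step_size → Spec_spiral_pattern center_x center_y max_radius step_size (spiral_pattern center_x center_y max_radius step_size)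

-- ===== LEMMAS AND PROOFS =====

-- a positive-step python range, unrolled one element
lemma pyRange_pos_cons (a b s : Int) (hs : 0 < s) (h : a < b) :
    PySem.List.pyRange a b s = a :: PySem.List.pyRange (a + s) b s := by
  rw [PySem.List.pyRange_of_pos _ _ hs, PySem.List.pyRange_of_pos _ _ hs, if_pos h]
  by_cases h2 : a + s < b
  · rw [if_pos h2]
    have hcnt : ((b - a + s - 1) / s).toNat = ((b - (a + s) + s - 1) / s).toNat + 1 := by
      have e : b - a + s - 1 = (b - (a + s) + s - 1) + 1 * s := by ring
      rw [e, Int.add_mul_ediv_right _ _ (ne_of_gt hs)]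
      have h0 : 0 ≤ (b - (a + s) + s - 1) / s := by
        apply Int.ediv_nonneg <;> omega
      omega
    rw [hcnt, List.range_succ_eq_map, List.map_cons, List.map_map]
    refine List.cons_eq_cons.mpr ⟨by norm_num, ?_⟩
    apply List.map_congr_left; intro k _
    simp only [Function.comp_apply, Nat.succ_eq_add_one]
    push_cast; ring
  · rw [if_neg h2]
    have hcnt : ((b - a + s - 1) / s).toNat = 1 := by
      have e : b - a + s - 1 = (b - a - 1) + 1 * s := by ring
      rw [e, Int.add_mul_ediv_right _ _ (ne_of_gt hs)]
      rw [Int.ediv_eq_zero_of_lt (by omega) (by omega)]; decide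
    rw [hcnt]
    norm_num [List.range_succ]

lemma pyRange_pos_nil (a b s : Int) (hs : 0 < s) (h : b ≤ a) :
    PySem.List.pyRange a b s = [] := by
  rw [PySem.List.pyRange_of_pos _ _ hs, if_neg (by omega)]
  simp

-- B's while loop is the fold of its body over the python range of radii
lemma pvRings_eq_foldl (cx cy maxr s : Int) (hs : 1 ≤ s) :
    ∀ (fuel : Nat) (radius : Int) (acc : List (Int × Int)),
      (maxr + 1 - radius).toNat ≤ fuel →
      pvRings cx cy maxr s radius acc =
        (PySem.List.pyRange radius (maxr + 1) s).foldl
          (fun acc r => acc ++ pvRing cx cy r s) acc := by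
  intro fuel
  induction fuel with
  | zero =>
      intro radius acc h
      rw [pvRings, dif_neg (by omega), pyRange_pos_nil _ _ _ (by omega) (by omega),
        List.foldl_nil]
  | succ fuel ih =>
      intro radius acc h
      by_cases hr : radius ≤ maxr
      · rw [pvRings, dif_pos ⟨hs, hr⟩, pyRange_pos_cons _ _ _ (by omega) (by omega),
          List.foldl_cons, ih _ _ (by omega)]
      · rw [pvRings, dif_neg (by omega), pyRange_pos_nil _ _ _ (by omega) (by omega),
          List.foldl_nil]

-- closed form of pvRun: final position and the list of yielded points
lemma pvRun_eq (s dx dy : Int) (m : Nat) :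
    ∀ (x y : Int) (acc : List (Int × Int)),
      pvRun s dx dy m (x, y, acc) =
        (x + dx * s * m, y + dy * s * m,
         acc ++ (List.range m).map
           (fun k : Nat => (x + dx * s * ((k : Int) + 1), y + dy * s * ((k : Int) + 1)))) := by
  induction m with
  | zero => intro x y acc; simp [pvRun]
  | succ m ih =>
      intro x y acc
      rw [pvRun, ih, List.range_succ_eq_map, List.map_cons, List.map_map]
      refine Prod.ext (by dsimp; ring) (Prod.ext (by dsimp; ring) ?_)
      dsimp
      rw [List.append_assoc, List.singleton_append]
      congr 1
      refine List.cons_eq_cons.mpr ⟨Prod.ext (by ring) (by ring), ?_⟩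
      apply List.map_congr_left
      intro k _
      simp only [Function.comp_apply, Nat.succ_eq_add_one]
      push_cast
      exact Prod.ext (by ring) (by ring)

-- the per-radius ring bodies agree when radius = s * (m + 1) with 0 < s
lemma pvRing_eq (cx cy s : Int) (m : Nat) (hs : 0 < s) :
    ((PySem.List.pyRange 0 (2 * (s * (m + 1)) + 1) s).map
        (fun i => ((cx - s * (m + 1)) + i, cy - s * (m + 1)))
      ++ (PySem.List.pyRange s (2 * (s * (m + 1)) + 1) s).map
        (fun i => (cx + s * (m + 1), (cy - s * (m + 1)) + i))
      ++ (PySem.List.pyRange s (2 * (s * (m + 1)) + 1) s).map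
        (fun i => ((cx + s * (m + 1)) - i, cy + s * (m + 1)))
      ++ (PySem.List.pyRange s (2 * (s * (m + 1))) s).map
        (fun i => (cx - s * (m + 1), (cy + s * (m + 1)) - i)))
    = pvRing cx cy (s * (m + 1)) s := by
  have hsne : s ≠ 0 := ne_of_gt hs
  -- lengths of the four python ranges
  have h1 : ((2 * (s * (m + 1)) + 1 - 0 + s - 1) / s).toNat = 2 * m + 3 := by
    have : 2 * (s * (m + 1)) + 1 - 0 + s - 1 = s * (2 * m + 3) := by ring
    rw [this, Int.mul_ediv_cancel_left _ hsne]; omega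
  have h2 : ((2 * (s * (m + 1)) + 1 - s + s - 1) / s).toNat = 2 * m + 2 := by
    have : 2 * (s * (m + 1)) + 1 - s + s - 1 = s * (2 * m + 2) := by ring
    rw [this, Int.mul_ediv_cancel_left _ hsne]; omega
  have h3 : ((2 * (s * (m + 1)) - s + s - 1) / s).toNat = 2 * m + 1 := by
    have e : 2 * (s * (m + 1)) - s + s - 1 = (s - 1) + (2 * m + 1) * s := by ring
    rw [e, Int.add_mul_ediv_right _ _ hsne, Int.ediv_eq_zero_of_lt (by omega) (by omega)]
    omega
  have hc1 : (0 : Int) < 2 * (s * (m + 1)) + 1 := by nlinarith [Int.natCast_nonneg m]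
  have hc2 : s < 2 * (s * (m + 1)) + 1 := by nlinarith [Int.natCast_nonneg m]
  have hc3 : s < 2 * (s * (m + 1)) := by nlinarith [Int.natCast_nonneg m]
  have hn : PySem.Int.floordiv (2 * (s * (m + 1))) s = 2 * (m : Int) + 2 := by
    rw [PySem.Int.floordiv_eq_ediv_of_pos hs]
    have : 2 * (s * (m + 1)) = s * (2 * m + 2) := by ring
    rw [this, Int.mul_ediv_cancel_left _ hsne]
  simp only [pvRing, PySem.List.enumerate_cons, PySem.List.enumerate_nil, List.foldl_cons,
    List.foldl_nil, hn]
  norm_num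
  have ht2 : ((2 * (m : Int) + 2)).toNat = 2 * m + 2 := by omega
  have ht3 : 2 * m + 2 - 1 = 2 * m + 1 := by omega
  rw [ht2, ht3, pvRun_eq, pvRun_eq, pvRun_eq, pvRun_eq]
  dsimp
  rw [PySem.List.pyRange_of_pos _ _ hs, PySem.List.pyRange_of_pos _ _ hs,
    PySem.List.pyRange_of_pos _ _ hs, if_pos hc1, if_pos hc2, if_pos hc3, h1, h2, h3,
    List.map_map, List.map_map, List.map_map, List.map_map]
  rw [show 2 * m + 3 = (2 * m + 2) + 1 from rfl, List.range_succ_eq_map, List.map_cons,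
    List.map_map]
  simp only [List.append_assoc, List.cons_append]
  refine List.cons_eq_cons.mpr ⟨Prod.ext (by dsimp; ring) (by dsimp), ?_⟩
  congr 1
  · apply List.map_congr_left; intro k _
    simp only [Function.comp_apply, Nat.succ_eq_add_one]
    push_cast
    exact Prod.ext (by ring) (by ring)
  congr 1
  · apply List.map_congr_left; intro k _
    simp only [Function.comp_apply]
    exact Prod.ext (by ring) (by ring)
  congr 1
  · apply List.map_congr_left; intro k _
    simp only [Function.comp_apply]
    exact Prod.ext (by ring) (by ring)
  apply List.map_congr_left; intro k _
  simp only [Function.comp_apply]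
  exact Prod.ext (by ring) (by ring)

-- ===== VERDICT (by name: the statement is the Claim_ definition above) =====
theorem spiral_pattern_spec : Claim_equal_spiral_pattern := by
  intro cx cy maxr s _ hpre
  unfold Spec_spiral_pattern spiral_pattern spiral_pattern_alt
  have hs : (0 : Int) < s := hpre
  rw [if_neg (by omega)]
  congr 1
  rw [pvRings_eq_foldl cx cy maxr s hpre (maxr + 1 - s).toNat s [] (by omega)]
  apply PySem.List.foldl_congr_mem
  intro acc r hr
  rw [PySem.List.mem_pyRange_iff_of_pos hs] at hr
  obtain ⟨hsr, _, c, hc⟩ := hr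
  have hc0 : 0 ≤ c := by nlinarith
  obtain ⟨m, hm⟩ : ∃ m : Nat, c = (m : Int) := ⟨c.toNat, (Int.toNat_of_nonneg hc0).symm⟩
  have hr2 : r = s * ((m : Int) + 1) := by rw [hm] at hc; linarith
  subst hr2
  rw [List.append_assoc, List.append_assoc, List.append_assoc]
  congr 1
  rw [← pvRing_eq cx cy s m hs]
  simp [List.append_assoc]
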